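-- pv_equiv track=rewrite | github.com/afni/afni | src/python_scripts/afnipy/lib_format_cmd_str.py | make_big_list_auto
-- ===== SOURCE A (Python) =====
-- def make_big_list_auto(arg_list):
--     '''Take the arge list already passed through whitespace splitting and
--     quote-pairing and make a 'big_list' of the opts.  Namely, return a
--     list of sub-lists, where the [0]th list is the program name and
--     each subsequent list will contain an option and any args for it.
--
--     In this function, the determination of a new sub-list is made
--     automatically with some logic.
--
--     See make_big_list_from_args(...) if you know the opt names for the
--     program and want to split arg_list into sublists using that.
--
--     '''
--
--     # initialize list: [0]th item should be program name
--     big_list  = [[arg_list[0]]]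
--     mini_list = []
--     i = 1
--     N = len(arg_list)
--
--     while i < N :
--         iarg = arg_list[i]
--         narg = len(iarg)
--         if iarg[0] == '-' and narg == 1 :
--             # looks like new opt: store any existing (non-empty)
--             # mini_list, and start new one with this str
--             if mini_list :
--                 big_list.append(mini_list)
--             mini_list = [iarg]
--         elif iarg[0:2] == '--' or \
--              ( iarg[0] == '-' and not(iarg[1:].isdigit()) ) :
--             # looks like new opt: store any existing (non-empty)
--             # mini_list, and start new one with this str
--             if mini_list :
--                 big_list.append(mini_list)
--             mini_list = [iarg]
--         elif mini_list :
--             # otherwise, if a mini_list exists, keep adding to it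
--             mini_list.append(iarg)
--         else:
--             # otherwise, there is no mini_list and this looks like an
--             # arg-by-position: is its own mini_list
--             big_list.append([iarg])
--         i+= 1
--     if mini_list :
--         # add any remaining mini_list
--         big_list.append(mini_list)
--
--     return big_list
-- ===== SOURCE B (Python) =====
-- def _is_opt(a):
--     return a[0:2] == '--' or (a[0] == '-' and not a[1:].isdigit())
--
-- def make_big_list_auto(arg_list):
--     big_list = [[arg_list[0]]]
--     i, N = 1, len(arg_list)
--     while i < N:
--         head = arg_list[i]
--         i += 1
--         if _is_opt(head):
--             j = i
--             while j < N and not _is_opt(arg_list[j]):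
--                 j += 1
--             big_list.append([head] + arg_list[i:j])
--             i = j
--         else:
--             big_list.append([head])
--     return big_list
-- ===== Notes on version B (the rewrite author's own statement) =====
-- stated objective: alternative
-- what changed: Replaces A's running mini_list accumulator state machine (flush-on-next-option plus a trailing flush after the loop) with boundary-driven grouping: for each option token B scans ahead to the next option boundary and slices that option's args out of arg_list in one go, so no pending-group state or post-loop flush exists.
import Mathlib
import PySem

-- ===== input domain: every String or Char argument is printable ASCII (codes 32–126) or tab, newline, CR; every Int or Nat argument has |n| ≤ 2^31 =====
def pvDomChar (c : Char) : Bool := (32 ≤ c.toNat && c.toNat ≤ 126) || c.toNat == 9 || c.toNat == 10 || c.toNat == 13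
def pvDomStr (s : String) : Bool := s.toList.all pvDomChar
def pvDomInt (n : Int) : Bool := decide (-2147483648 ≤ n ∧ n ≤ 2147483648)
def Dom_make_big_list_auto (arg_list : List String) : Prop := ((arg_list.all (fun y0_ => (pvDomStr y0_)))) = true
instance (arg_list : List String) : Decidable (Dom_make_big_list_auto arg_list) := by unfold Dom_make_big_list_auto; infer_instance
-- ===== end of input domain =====

-- B replaces A's running mini_list accumulator (flush-on-next-option plus trailing flush) by
-- boundary-driven grouping: for each option token it scans ahead to the next option boundary and
-- slices that option's args out in one go (objective: alternative decomposition, same O(n) cost).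

-- ===== PORT A =====
-- iarg[0] == '-' and narg == 1
def mblaTestNew1 (iarg : String) : Bool :=
  PySem.Str.pyGet? iarg 0 == some '-' && PySem.Str.len iarg == 1
-- iarg[0:2] == '--' or (iarg[0] == '-' and not iarg[1:].isdigit())
def mblaTestNew2 (iarg : String) : Bool :=
  PySem.Str.slice iarg (some 0) (some 2) == "--" ||
    (PySem.Str.pyGet? iarg 0 == some '-' && !PySem.Str.strIsdigit (PySem.Str.slice iarg (some 1) none))

-- the while loop over i = 1 .. N-1 (walked as the list of remaining tokens), state
-- (big_list, mini_list); the base case is the trailing 'if mini_list: big_list.append(mini_list)'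
def mblaLoopA : List String → List (List String) → List String → List (List String)
  | [], big, mini => if mini.isEmpty then big else big ++ [mini]
  | iarg :: rest, big, mini =>
    if mblaTestNew1 iarg then
      mblaLoopA rest (if mini.isEmpty then big else big ++ [mini]) [iarg]
    else if mblaTestNew2 iarg then
      mblaLoopA rest (if mini.isEmpty then big else big ++ [mini]) [iarg]
    else if !mini.isEmpty then
      mblaLoopA rest big (mini ++ [iarg])
    else
      mblaLoopA rest (big ++ [[iarg]]) mini

def make_big_list_auto (arg_list : List String) : List (List String) :=
  match arg_list with
  | [] => []          -- Python raises IndexError here (arg_list[0]); excluded by Pre_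
  | a0 :: rest => mblaLoopA rest [[a0]] []

-- ===== PORT B =====
-- _is_opt: a[0:2] == '--' or (a[0] == '-' and not a[1:].isdigit())
def isOptB (a : String) : Bool :=
  PySem.Str.slice a (some 0) (some 2) == "--" ||
    (PySem.Str.pyGet? a 0 == some '-' && !PySem.Str.strIsdigit (PySem.Str.slice a (some 1) none))

-- inner while: j = i; while j < N and not _is_opt(arg_list[j]): j += 1
-- (arg_list[j] is read with pyGetD and default ""; the default is never hit since j < N)
def spanEndB (arg_list : List String) (N : Nat) (j : Nat) : Nat :=
  if j < N && !isOptB (PySem.List.pyGetD arg_list (j : Int) "") then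
    spanEndB arg_list N (j + 1)
  else j
termination_by N - j
decreasing_by
  rename_i h
  simp only [Bool.and_eq_true, decide_eq_true_eq] at h
  omega

theorem spanEndB_ge (arg_list : List String) (N : Nat) (j : Nat) :
    j ≤ spanEndB arg_list N j := by
  induction hn : N - j using Nat.strong_induction_on generalizing j with
  | _ n ih =>
    rw [spanEndB]
    split
    · rename_i h
      simp only [Bool.and_eq_true, decide_eq_true_eq] at h
      exact Nat.le_trans (Nat.le_succ _) (ih (N - (j + 1)) (by omega) _ rfl)
    · exact Nat.le_refl _

-- outer while: i = 1; while i < N: … (arg_list[i] read with pyGetD, default never hit)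
def mblaLoopB (arg_list : List String) (N : Nat) (big : List (List String)) (i : Nat) :
    List (List String) :=
  if i < N then
    let head := PySem.List.pyGetD arg_list (i : Int) ""
    if isOptB head then
      let j := spanEndB arg_list N (i + 1)
      mblaLoopB arg_list N
        (big ++ [head :: PySem.List.slice arg_list (some ((i + 1 : Nat) : Int)) (some ((j : Nat) : Int))]) j
    else
      mblaLoopB arg_list N (big ++ [[head]]) (i + 1)
  else big
termination_by N - i
decreasing_by
  · have := spanEndB_ge arg_list N (i + 1); omega
  · omega

def make_big_list_auto_alt (arg_list : List String) : List (List String) :=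
  match arg_list with
  | [] => []          -- Python raises IndexError here (arg_list[0]); excluded by Pre_
  | a0 :: _ => mblaLoopB arg_list arg_list.length [[a0]] 1

-- ===== PRECONDITION & SPEC =====
-- Python raises IndexError on an empty arg_list (arg_list[0]) and on any empty token after
-- position 0 (iarg[0] inside the loop); both A and B raise there, Pre_ excludes exactly those.
def Pre_make_big_list_auto (arg_list : List String) : Prop :=
  arg_list ≠ [] ∧ ∀ s ∈ arg_list.drop 1, s ≠ ""
instance (arg_list : List String) : Decidable (Pre_make_big_list_auto arg_list) := by
  unfold Pre_make_big_list_auto; infer_instance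
def pvWitness_make_big_list_auto : List String := ["prog", "-a", "1", "x"]

def Spec_make_big_list_auto (arg_list : List String) (out : List (List String)) : Prop := out = make_big_list_auto_alt arg_list
instance (arg_list : List String) (out : List (List String)) : Decidable (Spec_make_big_list_auto arg_list out) := by unfold Spec_make_big_list_auto; infer_instance

-- ===== CLAIM (what is proved, stated in full; the proofs are below) =====
def Claim_equal_make_big_list_auto : Prop := ∀ (arg_list : List String), Dom_make_big_list_auto arg_list → Pre_make_big_list_auto arg_list → Spec_make_big_list_auto arg_list (make_big_list_auto arg_list)

-- ===== LEMMAS AND PROOFS =====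

-- list-structural intermediate: B's grouping expressed on the suffix of remaining tokens
def spanNonopt (taken : List String) : List String → List String × List String
  | [] => (taken, [])
  | x :: xs => if !isOptB x then spanNonopt (taken ++ [x]) xs else (taken, x :: xs)

theorem spanNonopt_snd_len (taken xs : List String) :
    (spanNonopt taken xs).2.length ≤ xs.length := by
  induction xs generalizing taken with
  | nil => simp [spanNonopt]
  | cons x xs ih =>
    simp only [spanNonopt]
    split
    · exact Nat.le_trans (ih _) (Nat.le_succ _)
    · exact Nat.le_refl _

def loopBL (big : List (List String)) : List String → List (List String)
  | [] => big
  | h :: rest =>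
    if isOptB h then
      let p := spanNonopt [] rest
      loopBL (big ++ [h :: p.1]) p.2
    else
      loopBL (big ++ [[h]]) rest
termination_by l => l.length
decreasing_by
  · exact Nat.lt_succ_of_le (spanNonopt_snd_len [] rest)
  · exact Nat.lt_succ_self _

theorem loopBL_nil (big : List (List String)) : loopBL big [] = big := by
  rw [loopBL.eq_def]

theorem loopBL_cons (big : List (List String)) (h : String) (rest : List String) :
    loopBL big (h :: rest) =
      if isOptB h then loopBL (big ++ [h :: (spanNonopt [] rest).1]) (spanNonopt [] rest).2
      else loopBL (big ++ [[h]]) rest := by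
  rw [loopBL.eq_def]

-- A's first branch ('-' of length 1) satisfies B's option test too: s = "-", s[0:2] = "-" ≠ "--",
-- ''.isdigit() = False.
theorem test1_imp_isOpt (s : String) (h : mblaTestNew1 s = true) : isOptB s = true := by
  have hs : s.toList = ['-'] := by
    simp only [mblaTestNew1, Bool.and_eq_true, beq_iff_eq] at h
    obtain ⟨h0, h1⟩ := h
    rw [show ((0:Int)) = ((0:Nat):Int) from rfl, PySem.Str.pyGet?_natCast] at h0
    have hlen : s.toList.length = 1 := by
      have := h1; simpa [PySem.Str.len_eq] using this
    match hl : s.toList, hlen with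
    | [c], _ => simp [hl] at h0; simp [h0]
  simp [isOptB, PySem.Str.strIsdigit_eq, PySem.Str.toList_slice, hs,
        PySem.Chars.slice_eq_listSlice, PySem.List.slice, PySem.Chars.strIsdigit]

theorem test2_eq_isOpt : mblaTestNew2 = isOptB := rfl

theorem loopA_big (l : List String) (big : List (List String)) (mini : List String) :
    mblaLoopA l big mini = big ++ mblaLoopA l [] mini := by
  induction l generalizing big mini with
  | nil => simp only [mblaLoopA]; by_cases h : mini.isEmpty <;> simp [h]
  | cons x xs ih =>
    simp only [mblaLoopA]
    split
    · rw [ih, ih (if mini.isEmpty then [] else [] ++ [mini])]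
      by_cases h : mini.isEmpty <;> simp [h]
    · split
      · rw [ih, ih (if mini.isEmpty then [] else [] ++ [mini])]
        by_cases h : mini.isEmpty <;> simp [h]
      · split
        · rw [ih, ih []]
        · rw [ih, ih ([] ++ [[x]])]; simp

theorem loopBL_big (big : List (List String)) (l : List String) :
    loopBL big l = big ++ loopBL [] l := by
  induction hn : l.length using Nat.strong_induction_on generalizing big l with
  | _ n ih =>
    match l with
    | [] => simp [loopBL_nil]
    | h :: rest =>
      subst hn
      rw [loopBL_cons, loopBL_cons]
      by_cases hopt : isOptB h
      · simp only [hopt, if_pos]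
        rw [ih _ (Nat.lt_succ_of_le (spanNonopt_snd_len [] rest)) _ _ rfl,
            ih _ (Nat.lt_succ_of_le (spanNonopt_snd_len [] rest)) ([] ++ [h :: (spanNonopt [] rest).1]) _ rfl]
        simp
      · simp only [Bool.not_eq_true] at hopt
        simp only [hopt, Bool.false_eq_true, if_false]
        rw [ih _ (Nat.lt_succ_self _) _ _ rfl, ih _ (Nat.lt_succ_self _) ([] ++ [[h]]) _ rfl]
        simp

theorem span_eq (taken xs : List String) :
    spanNonopt taken xs =
      (taken ++ xs.takeWhile (fun x => !isOptB x), xs.dropWhile (fun x => !isOptB x)) := by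
  induction xs generalizing taken with
  | nil => simp [spanNonopt]
  | cons x xs ih =>
    by_cases h : isOptB x
    · simp [spanNonopt, h]
    · simp [spanNonopt, h, ih]

theorem loopA_mini (l : List String) (mini : List String) (h : mini ≠ []) :
    mblaLoopA l [] mini =
      (mini ++ l.takeWhile (fun x => !isOptB x)) ::
        loopBL [] (l.dropWhile (fun x => !isOptB x)) := by
  induction l generalizing mini with
  | nil => simp [mblaLoopA, h, loopBL_nil]
  | cons x xs ih =>
    by_cases hopt : isOptB x
    · rw [mblaLoopA]
      by_cases ht1 : mblaTestNew1 x
      · simp only [ht1, if_pos]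
        rw [show (if mini.isEmpty then [] else ([]:List (List String)) ++ [mini]) = [mini] by simp [h]]
        rw [loopA_big, ih [x] (by simp)]
        simp only [List.takeWhile_cons, List.dropWhile_cons, hopt, Bool.not_true,
                   Bool.false_eq_true, if_false]
        rw [loopBL_cons]
        simp only [hopt, if_pos]
        rw [span_eq]
        conv_rhs => rw [loopBL_big]
        simp
      · have ht2 : mblaTestNew2 x := by rw [test2_eq_isOpt]; exact hopt
        simp only [ht1, Bool.false_eq_true, if_false, ht2, if_pos]
        rw [show (if mini.isEmpty then [] else ([]:List (List String)) ++ [mini]) = [mini] by simp [h]]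
        rw [loopA_big, ih [x] (by simp)]
        simp only [List.takeWhile_cons, List.dropWhile_cons, hopt, Bool.not_true,
                   Bool.false_eq_true, if_false]
        rw [loopBL_cons]
        simp only [hopt, if_pos]
        rw [span_eq]
        conv_rhs => rw [loopBL_big]
        simp
    · have ht1 : mblaTestNew1 x = false := by
        by_contra hc
        simp only [Bool.not_eq_false] at hc
        exact hopt (test1_imp_isOpt x hc)
      have ht2 : mblaTestNew2 x = false := by
        rw [test2_eq_isOpt]; simpa using hopt
      rw [mblaLoopA]
      simp only [ht1, ht2, Bool.false_eq_true, if_false]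
      rw [if_pos (by simp [h])]
      rw [ih (mini ++ [x]) (by simp)]
      simp [hopt]

theorem loopAB (l : List String) : mblaLoopA l [] [] = loopBL [] l := by
  match l with
  | [] => simp [mblaLoopA, loopBL_nil]
  | x :: xs =>
    by_cases hopt : isOptB x
    · have hA : mblaLoopA (x :: xs) [] [] = mblaLoopA xs [] [x] := by
        rw [mblaLoopA]
        by_cases ht1 : mblaTestNew1 x
        · simp [ht1]
        · have ht2 : mblaTestNew2 x := by rw [test2_eq_isOpt]; exact hopt
          simp [ht1, ht2]
      rw [hA, loopA_mini xs [x] (by simp)]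
      rw [loopBL_cons]
      simp only [hopt, if_pos]
      rw [span_eq]
      conv_rhs => rw [loopBL_big]
      simp
    · have ht1 : mblaTestNew1 x = false := by
        by_contra hc
        simp only [Bool.not_eq_false] at hc
        exact hopt (test1_imp_isOpt x hc)
      have ht2 : mblaTestNew2 x = false := by
        rw [test2_eq_isOpt]; simpa using hopt
      rw [mblaLoopA]
      simp only [ht1, ht2, Bool.false_eq_true, if_false]
      simp only [List.isEmpty_nil, Bool.not_true, Bool.false_eq_true, if_false]
      rw [loopA_big, loopAB xs]
      rw [loopBL_cons]
      simp only [hopt, Bool.false_eq_true, if_false]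
      conv_rhs => rw [loopBL_big]

-- prefix facts: take/drop at the takeWhile boundary
theorem take_len_takeWhile (l : List String) (p : String → Bool) :
    l.take (l.takeWhile p).length = l.takeWhile p := by
  calc l.take (l.takeWhile p).length
      = (l.takeWhile p ++ l.dropWhile p).take (l.takeWhile p).length := by
        rw [List.takeWhile_append_dropWhile]
    _ = l.takeWhile p := List.take_left ..

theorem drop_len_takeWhile (l : List String) (p : String → Bool) :
    l.drop (l.takeWhile p).length = l.dropWhile p := by
  calc l.drop (l.takeWhile p).length
      = (l.takeWhile p ++ l.dropWhile p).drop (l.takeWhile p).length := by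
        rw [List.takeWhile_append_dropWhile]
    _ = l.dropWhile p := List.drop_left ..

-- the boundary scan finds exactly the takeWhile length of the remaining suffix
theorem spanEndB_eq (xs : List String) (j : Nat) :
    spanEndB xs xs.length j = j + ((xs.drop j).takeWhile (fun x => !isOptB x)).length := by
  induction hn : xs.length - j using Nat.strong_induction_on generalizing j with
  | _ n ih =>
    rw [spanEndB]
    by_cases hj : j < xs.length
    · have hdrop : xs[j] :: xs.drop (j + 1) = xs.drop j := List.getElem_cons_drop hj
      have hget : PySem.List.pyGetD xs (j : Int) "" = xs[j] := by
        rw [PySem.List.pyGetD_eq_getElem xs "" (by omega) (by exact_mod_cast hj)]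
        simp
      by_cases hopt : isOptB xs[j]
      · rw [if_neg (by simp [hj, hget, hopt])]
        rw [← hdrop]
        simp [hopt]
      · rw [if_pos (by simp [hj, hget, hopt])]
        rw [ih (xs.length - (j + 1)) (by omega) _ rfl, ← hdrop]
        simp only [List.takeWhile_cons, hopt, Bool.not_false, if_pos, List.length_cons]
        omega
    · have hdrop : xs.drop j = [] := List.drop_eq_nil_of_le (by omega)
      rw [if_neg (by simp [hj]), hdrop]
      simp

-- B's index loop is the list-structural grouping on the remaining suffix
theorem loopB_eq_loopBL (xs : List String) (i : Nat) (big : List (List String)) :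
    mblaLoopB xs xs.length big i = loopBL big (xs.drop i) := by
  induction hn : xs.length - i using Nat.strong_induction_on generalizing i big with
  | _ n ih =>
    rw [mblaLoopB]
    by_cases hi : i < xs.length
    · have hdrop : xs[i] :: xs.drop (i + 1) = xs.drop i := List.getElem_cons_drop hi
      have hget : PySem.List.pyGetD xs (i : Int) "" = xs[i] := by
        rw [PySem.List.pyGetD_eq_getElem xs "" (by omega) (by exact_mod_cast hi)]
        simp
      rw [if_pos hi]
      simp only [hget]
      by_cases hopt : isOptB xs[i]
      · simp only [hopt, if_pos]
        have hspan := spanEndB_eq xs (i + 1)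
        have hslice : PySem.List.slice xs (some ((i + 1 : Nat) : Int))
              (some ((spanEndB xs xs.length (i + 1) : Nat) : Int)) =
            (xs.drop (i + 1)).takeWhile (fun x => !isOptB x) := by
          rw [hspan]
          rw [PySem.List.slice_natCast]
          rw [show i + 1 + ((xs.drop (i+1)).takeWhile (fun x => !isOptB x)).length - (i + 1) =
                ((xs.drop (i+1)).takeWhile (fun x => !isOptB x)).length by omega]
          exact take_len_takeWhile _ _
        have hrest : xs.drop (spanEndB xs xs.length (i + 1)) =
            (xs.drop (i + 1)).dropWhile (fun x => !isOptB x) := by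
          rw [hspan, ← List.drop_drop]
          exact drop_len_takeWhile _ _
        rw [ih (xs.length - spanEndB xs xs.length (i + 1))
              (by have := spanEndB_ge xs xs.length (i + 1); omega) _ _ rfl]
        rw [hslice, hrest, ← hdrop, loopBL_cons]
        simp only [hopt, if_pos]
        rw [span_eq]
        simp
      · simp only [hopt, Bool.false_eq_true, if_false]
        rw [ih (xs.length - (i + 1)) (by omega) _ _ rfl]
        rw [← hdrop, loopBL_cons]
        simp [hopt]
    · rw [if_neg hi, List.drop_eq_nil_of_le (by omega), loopBL_nil]

-- ===== VERDICT (by name: the statement is the Claim_ definition above) =====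
theorem make_big_list_auto_spec : Claim_equal_make_big_list_auto := by
  intro arg_list _ _
  unfold Spec_make_big_list_auto
  match arg_list with
  | [] => rfl
  | a0 :: rest =>
    show mblaLoopA rest [[a0]] [] = mblaLoopB (a0 :: rest) (a0 :: rest).length [[a0]] 1
    rw [loopB_eq_loopBL, loopA_big, loopAB]
    show [[a0]] ++ loopBL [] rest = loopBL [[a0]] ((a0 :: rest).drop 1)
    simp only [List.drop_succ_cons, List.drop_zero]
    rw [loopBL_big [[a0]] rest]
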